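-- pv_equiv track=rewrite | github.com/mariaandrioli/ciencia-de-dados | T2/Parte2/pe_cmp.py | unique_sections
-- ===== SOURCE A (Python) =====
-- from itertools import chain
--
-- def unique_sections(sections):
-- 	keys = list(sections.keys())
-- 	values = list(sections.values())
-- 	uniques_dict = {}
--
-- 	for A in values:
-- 		# Combine all the lists into one
-- 		super_list = list(chain(*values))
-- 		# Remove the items from the list under consideration
-- 		for x in A:
-- 			super_list.remove(x)
-- 		# Get the unique items remaining in the combined list
-- 		super_set = set(super_list)
-- 		# Compute the unique items in this list and print them
-- 		uniques = set(A) - super_set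
-- 		uniques_dict[keys.pop(0)] = sorted(uniques)
--
-- 	return uniques_dict
-- ===== SOURCE B (Python) =====
-- def unique_sections(sections):
--     # Count every value once across all sections, then compare per-section counts:
--     # an item is unique to its section iff its section count equals its global count.
--     total = {}
--     for v in sections.values():
--         for x in v:
--             total[x] = total.get(x, 0) + 1
--     out = {}
--     for k, v in sections.items():
--         cnt = {}
--         for x in v:
--             cnt[x] = cnt.get(x, 0) + 1
--         out[k] = sorted(x for x in cnt if total[x] == cnt[x])
--     return out
-- ===== Notes on version B (the rewrite author's own statement) =====
-- stated objective: faster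
-- what changed: Replaces per-section re-flattening of all values plus repeated list.remove scans with one global occurrence count and a per-section count; an item is unique iff the two counts match.
import Mathlib
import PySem

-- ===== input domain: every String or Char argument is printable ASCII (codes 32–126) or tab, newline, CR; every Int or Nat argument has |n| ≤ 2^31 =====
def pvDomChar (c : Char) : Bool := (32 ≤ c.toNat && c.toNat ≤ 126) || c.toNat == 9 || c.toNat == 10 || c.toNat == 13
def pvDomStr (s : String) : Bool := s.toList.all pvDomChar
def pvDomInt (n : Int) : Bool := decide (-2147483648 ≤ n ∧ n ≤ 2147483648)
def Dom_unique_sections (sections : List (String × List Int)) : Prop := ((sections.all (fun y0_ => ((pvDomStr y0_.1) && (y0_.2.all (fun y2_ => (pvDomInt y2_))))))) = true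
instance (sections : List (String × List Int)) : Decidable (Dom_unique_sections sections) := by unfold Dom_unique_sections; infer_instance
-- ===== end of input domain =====

-- ===== PORT A =====
-- B replaces A's per-section flatten + repeated list.remove scans by one global
-- occurrence count plus per-section counts (an item is unique iff the counts match).

-- for x in A: super_list.remove(x)   (remove? is none only when x is absent — unreachable here, A's items are in the flattened list)
def usRemoveAll (sl : List Int) (A : List Int) : List Int :=
  A.foldl (fun sl x => (PySem.List.remove? sl x).getD sl) sl

-- the `for A in values` loop, carrying the mutable `keys` (pop(0)) and `uniques_dict`
def usLoopA (values : List (List Int)) : List (List Int) → List String → PySem.Dict String (List Int) → PySem.Dict String (List Int)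
  | [], _, d => d
  | A :: rest, keys, d =>
      let super_list := usRemoveAll values.flatten A
      let super_set := PySem.Set.ofList super_list
      let uniques := PySem.Set.diff (PySem.Set.ofList A) super_set
      match PySem.List.pop? keys 0 with
      | none => d   -- keys.pop(0) IndexError: unreachable, keys has one entry per remaining value
      | some (k, keys') => usLoopA values rest keys' (d.insert k (PySem.List.sorted uniques (fun x => x) false))

def unique_sections (sections : List (String × List Int)) : List (String × List Int) :=
  let keys := sections.map Prod.fst
  let values := sections.map Prod.snd
  (usLoopA values values keys PySem.Dict.empty).items

-- ===== PORT B =====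
-- total[x] = total.get(x, 0) + 1, over all values
def usTotal (sections : List (String × List Int)) : PySem.Dict Int Int :=
  sections.foldl (fun t kv => kv.2.foldl (fun t x => t.insert x (t.getD x 0 + 1)) t) PySem.Dict.empty

def unique_sections_alt (sections : List (String × List Int)) : List (String × List Int) :=
  let total := usTotal sections
  (sections.foldl (fun out kv =>
      let cnt := kv.2.foldl (fun c x => c.insert x (c.getD x 0 + 1)) (PySem.Dict.empty : PySem.Dict Int Int)
      -- sorted(x for x in cnt if total[x] == cnt[x]); total[x] never raises: every key of cnt is a key of total
      out.insert kv.1 (PySem.List.sorted (cnt.keys.filter (fun x => total.getD x 0 == cnt.getD x 0)) (fun x => x) false))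
    PySem.Dict.empty).items

-- ===== PRECONDITION & SPEC =====
def Spec_unique_sections (sections : List (String × List Int)) (out : List (String × List Int)) : Prop := out = unique_sections_alt sections
instance (sections : List (String × List Int)) (out : List (String × List Int)) : Decidable (Spec_unique_sections sections out) := by unfold Spec_unique_sections; infer_instance

-- ===== CLAIM (what is proved, stated in full; the proofs are below) =====
def Claim_equal_unique_sections : Prop := ∀ (sections : List (String × List Int)), Dom_unique_sections sections → Spec_unique_sections sections (unique_sections sections)

-- ===== LEMMAS AND PROOFS =====

-- A's per-section value (set difference after the remove loop), as a named abbreviation for the proofs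
def usValA (values : List (List Int)) (A : List Int) : List Int :=
  PySem.List.sorted
    (PySem.Set.diff (PySem.Set.ofList A) (PySem.Set.ofList (usRemoveAll values.flatten A)))
    (fun x => x) false

-- counting: removing one occurrence of each element of A from sl subtracts A's counts
lemma usRemoveAll_count (A : List Int) : ∀ (sl : List Int),
    (∀ x, A.count x ≤ sl.count x) →
    ∀ y, (usRemoveAll sl A).count y = sl.count y - A.count y := by
  induction A with
  | nil => intro sl _ y; simp [usRemoveAll]
  | cons a A ih =>
    intro sl h y
    have ha : a ∈ sl := by
      have := h a
      rw [List.count_cons_self] at this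
      exact List.count_pos_iff.mp (by omega)
    have hrem : PySem.List.remove? sl a = some (sl.erase a) :=
      PySem.List.remove?_eq_some_erase sl a ha
    have hstep : usRemoveAll sl (a :: A) = usRemoveAll (sl.erase a) A := by
      simp [usRemoveAll, hrem]
    have hle : ∀ x, A.count x ≤ (sl.erase a).count x := by
      intro x
      have hx := h x
      rw [List.count_erase]
      simp [List.count_cons] at hx
      by_cases hax : a = x <;> simp [hax] at hx ⊢ <;> omega
    rw [hstep, ih (sl.erase a) hle y, List.count_erase]
    have hy := h y
    simp [List.count_cons] at hy ⊢
    by_cases hay : a = y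
    · simp [hay] at hy ⊢
      omega
    · simp [hay] at hy ⊢

-- the `for A in values` loop with keys popping in front is a fold over the (key, value) pairs
lemma usLoopA_eq_foldl (values : List (List Int)) :
    ∀ (secs : List (String × List Int)) (d : PySem.Dict String (List Int)),
    usLoopA values (secs.map Prod.snd) (secs.map Prod.fst) d
      = secs.foldl (fun d kv => d.insert kv.1 (usValA values kv.2)) d := by
  intro secs
  induction secs with
  | nil => intro d; simp [usLoopA]
  | cons kv secs ih =>
    intro d
    simp only [List.map_cons, usLoopA, PySem.List.pop?_zero_cons, List.foldl_cons]
    exact ih _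

-- the per-section value computed by A equals B's count comparison, for A one of the value lists
lemma usVal_eq (values : List (List Int)) (A : List Int) (hA : A ∈ values) :
    usValA values A
      = PySem.List.sorted
          (((PySem.Dict.counter A).keys).filter
            (fun x => (PySem.Dict.counter values.flatten).getD x 0 == (PySem.Dict.counter A).getD x 0))
          (fun x => x) false := by
  unfold usValA
  apply PySem.List.sorted_eq_sorted_of_perm
  · exact fun a b h => h
  · have hle : ∀ y, A.count y ≤ values.flatten.count y := by
      intro y
      rw [List.count_flatten]
      exact List.single_le_sum (fun n _ => Nat.zero_le n) _ (List.mem_map_of_mem hA)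
    rw [List.perm_ext_iff_of_nodup
        (PySem.Set.nodup_diff _ _ (PySem.Set.nodup_ofList A))
        (by rw [PySem.Dict.keys_counter]; exact (PySem.Set.nodup_ofList A).filter _)]
    intro x
    have hc := usRemoveAll_count A values.flatten hle x
    have hnm : x ∉ usRemoveAll values.flatten A ↔ (usRemoveAll values.flatten A).count x = 0 :=
      List.count_eq_zero.symm
    simp only [PySem.Set.mem_diff, PySem.Set.mem_ofList, List.mem_filter,
      PySem.Dict.keys_counter, PySem.Dict.getD_counter, beq_iff_eq, Int.natCast_inj]
    constructor
    · rintro ⟨hxA, hxr⟩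
      have h0 := hnm.mp hxr
      have := hle x
      exact ⟨hxA, by omega⟩
    · rintro ⟨hxA, heq⟩
      refine ⟨hxA, hnm.mpr ?_⟩
      omega
  
-- B's global count is the counter of the flattened values
lemma usTotal_eq (secs : List (String × List Int)) :
    usTotal secs = PySem.Dict.counter (secs.map Prod.snd).flatten := by
  rw [← PySem.Dict.foldl_insert_getD_add_one_eq_counter, List.foldl_flatten, List.foldl_map]
  rfl

-- ===== VERDICT (by name: the statement is the Claim_ definition above) =====
theorem unique_sections_spec : Claim_equal_unique_sections := by
  intro secs _
  dsimp only [Spec_unique_sections, unique_sections, unique_sections_alt]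
  rw [usLoopA_eq_foldl]
  apply congrArg PySem.Dict.items
  apply PySem.List.foldl_congr_mem
  intro acc kv hkv
  rw [usVal_eq (secs.map Prod.snd) kv.2 (List.mem_map_of_mem hkv),
    PySem.Dict.foldl_insert_getD_add_one_eq_counter, usTotal_eq]
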